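-- pv_equiv track=rewrite | github.com/pypi-data/pypi-mirror-39 | packages/FileTransforms/FileTransforms-0.2.1.tar.gz/FileTransforms-0.2.1/FileTransforms/header_utils.py | enumerate_headers
-- ===== SOURCE A (Python) =====
-- def enumerate_headers(headers, tokens, start_idx=1):
--     token_counts = {}
--     for t in tokens:
--         token_counts[t] = start_idx
--
--     for i, header in enumerate(headers):
--         if header in tokens:
--             headers[i] = header + str(token_counts[header])
--             token_counts[header] += 1
--
--     return headers
-- ===== SOURCE B (Python) =====
-- def enumerate_headers(headers, tokens, start_idx=1):
--     tokset = set(tokens)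
--     positions = {}
--     for i, h in enumerate(headers):
--         if h in tokset:
--             positions.setdefault(h, []).append(i)
--     for h, idxs in positions.items():
--         for n, i in enumerate(idxs):
--             headers[i] = h + str(start_idx + n)
--     return headers
-- ===== Notes on version B (the rewrite author's own statement) =====
-- stated objective: faster
-- what changed: A does one counter-carrying scan that looks each header up in the tokens list (O(t) scan per header) and in a live counter dict; B instead groups first (one pass over the original header values building a token-to-positions index, with an O(1) set membership test) and then assigns start_idx, start_idx+1, ... per token from that index.
import Mathlib
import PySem

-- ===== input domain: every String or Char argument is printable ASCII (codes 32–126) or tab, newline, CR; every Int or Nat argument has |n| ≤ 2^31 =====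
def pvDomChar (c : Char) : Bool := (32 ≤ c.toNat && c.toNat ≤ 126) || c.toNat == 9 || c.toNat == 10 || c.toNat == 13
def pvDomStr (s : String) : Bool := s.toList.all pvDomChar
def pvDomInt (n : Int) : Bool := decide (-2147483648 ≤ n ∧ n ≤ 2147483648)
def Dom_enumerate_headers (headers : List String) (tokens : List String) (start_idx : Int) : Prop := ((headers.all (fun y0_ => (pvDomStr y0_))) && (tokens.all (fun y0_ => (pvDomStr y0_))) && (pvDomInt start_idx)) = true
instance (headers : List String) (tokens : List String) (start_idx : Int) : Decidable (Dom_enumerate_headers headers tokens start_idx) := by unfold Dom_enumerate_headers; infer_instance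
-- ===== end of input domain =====

-- B replaces A's counter-carrying scan (which tests each header against the tokens LIST)
-- with a group-by pass: build a token → positions index from the original header values
-- using a set membership test, then assign start_idx, start_idx+1, … per token (objective:
-- faster, O(n·t) → O(n+t); measured faster in a timing run). Both Pythons mutate
-- `headers` in place identically and return it; the equivalence is about the return value.

-- ===== PORT A =====
def enumerate_headers (headers : List String) (tokens : List String) (start_idx : Int) : List String :=
  -- token_counts = {}; for t in tokens: token_counts[t] = start_idx
  let token_counts : PySem.Dict String Int :=
    tokens.foldl (fun d t => d.insert t start_idx) PySem.Dict.empty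
  -- for i, header in enumerate(headers): if header in tokens: headers[i] = header + str(token_counts[header]); token_counts[header] += 1
  -- (every matched header is a token inserted by the first loop, so token_counts[header]
  --  never raises KeyError; getD's default 0 is never read — exact)
  let st :=
    (PySem.List.enumerate headers 0).foldl
      (fun (st : List String × PySem.Dict String Int) p =>
        if p.2 ∈ tokens then
          (PySem.List.pySetD st.1 p.1 (p.2 ++ PySem.Int.toStr (st.2.getD p.2 0)),
           st.2.insert p.2 (st.2.getD p.2 0 + 1))
        else st)
      (headers, token_counts)
  st.1

-- ===== PORT B =====
def enumerate_headers_alt (headers : List String) (tokens : List String) (start_idx : Int) : List String :=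
  let tokset : PySem.Set String := PySem.Set.ofList tokens
  -- positions = {}; for i, h in enumerate(headers): if h in tokset: positions.setdefault(h, []).append(i)
  let positions : PySem.Dict String (List Int) :=
    (PySem.List.enumerate headers 0).foldl
      (fun d p => if PySem.Set.contains tokset p.2 then d.modify p.2 [] (· ++ [p.1]) else d)
      PySem.Dict.empty
  -- for h, idxs in positions.items(): for n, i in enumerate(idxs): headers[i] = h + str(start_idx + n)
  positions.items.foldl
    (fun hs q =>
      (PySem.List.enumerate q.2 0).foldl
        (fun hs2 r => PySem.List.pySetD hs2 r.2 (q.1 ++ PySem.Int.toStr (start_idx + r.1)))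
        hs)
    headers

-- ===== PRECONDITION & SPEC =====
def Spec_enumerate_headers (headers : List String) (tokens : List String) (start_idx : Int) (out : List String) : Prop := out = enumerate_headers_alt headers tokens start_idx
instance (headers : List String) (tokens : List String) (start_idx : Int) (out : List String) : Decidable (Spec_enumerate_headers headers tokens start_idx out) := by unfold Spec_enumerate_headers; infer_instance

-- ===== CLAIM (what is proved, stated in full; the proofs are below) =====
def Claim_equal_enumerate_headers : Prop := ∀ (headers : List String) (tokens : List String) (start_idx : Int), Dom_enumerate_headers headers tokens start_idx → Spec_enumerate_headers headers tokens start_idx (enumerate_headers headers tokens start_idx)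

-- ===== LEMMAS AND PROOFS =====

def modelGo (tokens : List String) (s : Int) : List String → List String → List String
  | _, [] => []
  | prev, h :: rest =>
      (if h ∈ tokens then h ++ PySem.Int.toStr (s + (prev.count h : Int)) else h)
        :: modelGo tokens s (prev ++ [h]) rest

lemma modelGo_getElem? (tokens : List String) (s : Int) :
    ∀ (rest prev : List String) (i : Nat),
    (modelGo tokens s prev rest)[i]?
      = rest[i]?.map (fun h =>
          if h ∈ tokens then h ++ PySem.Int.toStr (s + (((prev ++ rest.take i).count h : Nat) : Int)) else h) := by
  intro rest
  induction rest with
  | nil => intro prev i; simp [modelGo]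
  | cons x rest ih =>
    intro prev i
    cases i with
    | zero => simp [modelGo]
    | succ i =>
      simp only [modelGo, List.getElem?_cons_succ, ih (prev ++ [x]) i, List.take_succ_cons,
        List.append_assoc, List.singleton_append]

def occFrom (h : String) (s : Int) (l : List String) : List Int :=
  ((PySem.List.enumerate l s).filter (fun p => p.2 == h)).map (fun p => p.1)

lemma mem_occFrom (h : String) (s : Int) (l : List String) (j : Int) :
    j ∈ occFrom h s l ↔ ∃ k : Nat, k < l.length ∧ l[k]? = some h ∧ j = s + k := by
  simp only [occFrom, List.mem_map, List.mem_filter, PySem.List.mem_enumerate_iff]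
  constructor
  · rintro ⟨p, ⟨⟨k, hk, rfl⟩, hh⟩, rfl⟩
    refine ⟨k, hk, ?_, rfl⟩
    simp only [beq_iff_eq] at hh
    simp [List.getElem?_eq_getElem hk, hh]
  · rintro ⟨k, hk, hh, rfl⟩
    refine ⟨(s + k, l[k]), ⟨⟨k, hk, rfl⟩, ?_⟩, rfl⟩
    simp only [List.getElem?_eq_getElem hk, Option.some_inj] at hh
    simp [hh]

lemma occFrom_cons (h x : String) (s : Int) (l : List String) :
    occFrom h s (x :: l) = (if x == h then [s] else []) ++ occFrom h (s + 1) l := by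
  by_cases hx : x == h <;>
    simp [occFrom, PySem.List.enumerate_cons, hx]

lemma idxOf_occFrom (h : String) :
    ∀ (l : List String) (s i : Nat),
    (((s + i : Nat) : Int)) ∈ occFrom h (s : Int) l →
    ((occFrom h (s : Int) l).idxOf ((s + i : Nat) : Int)) = (l.take i).count h := by
  intro l
  induction l with
  | nil => intro s i hm; simp [occFrom] at hm
  | cons x l ih =>
    intro s i hm
    have hcons := occFrom_cons h x (s : Int) l
    have hs1 : ((s : Int) + 1) = ((s + 1 : Nat) : Int) := by push_cast; ring
    by_cases hx : x == h
    · rw [hcons, hs1] at hm ⊢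
      simp only [hx, if_pos] at hm ⊢
      cases i with
      | zero => simp
      | succ i =>
        have hne : ((s + (i+1) : Nat) : Int) ≠ (s : Nat) := by push_cast; omega
        have hm2 : ((s + (i+1) : Nat) : Int) ∈ occFrom h ((s+1 : Nat) : Int) l := by
          rcases List.mem_append.mp hm with h1 | h1
          · simp at h1; omega
          · exact h1
        have harg : ((s + (i+1) : Nat) : Int) = (((s+1) + i : Nat) : Int) := by push_cast; ring
        have := ih (s+1) i (by rw [← harg]; exact hm2)
        simp only [List.singleton_append, List.idxOf_cons]
        have hbeq : (((s : Nat) : Int) == ((s + (i+1) : Nat) : Int)) = false := by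
          rw [beq_eq_false_iff_ne]; push_cast; omega
        rw [hbeq]
        simp only [cond_false]
        rw [harg, this]
        have hxh : x = h := by simpa using hx
        simp [List.take_succ_cons, hxh]
    · rw [hcons, hs1] at hm ⊢
      simp only [hx, if_neg, Bool.false_eq_true, not_false_iff, List.nil_append] at hm ⊢
      -- i cannot be 0: members of occFrom from s+1 are ≥ s+1
      rcases (mem_occFrom _ _ _ _).mp hm with ⟨k, hk, hkh, heq⟩
      have hi : 1 ≤ i := by push_cast at heq; omega
      have harg : ((s + i : Nat) : Int) = (((s+1) + (i-1) : Nat) : Int) := by push_cast; omega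
      rw [harg] at hm ⊢
      rw [ih (s+1) (i-1) hm]
      have hxh : ¬ (x = h) := by simpa using hx
      cases i with
      | zero => omega
      | succ i => simp [List.take_succ_cons, hxh]

lemma nodup_occFrom (h : String) (s : Int) (l : List String) : (occFrom h s l).Nodup := by
  have hp2 := (PySem.List.pairwise_lt_enumerate l s).filter (fun p => p.2 == h)
  unfold occFrom List.Nodup
  rw [List.pairwise_map]
  exact hp2.imp (fun hab => ne_of_lt hab)

lemma initCounts (start_idx : Int) (h : String) :
    ∀ (tokens : List String) (d : PySem.Dict String Int),
    (tokens.foldl (fun d t => d.insert t start_idx) d).get? h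
      = if h ∈ tokens then some start_idx else d.get? h := by
  intro tokens
  induction tokens with
  | nil => intro d; simp
  | cons t ts ih =>
    intro d
    simp only [List.foldl_cons, ih, PySem.Dict.get?_insert, List.mem_cons]
    by_cases h1 : h ∈ ts <;> by_cases h2 : h = t <;> simp [h1, h2]

lemma inner_length (hstr : String) (start_idx : Int) :
    ∀ (idxs : List Int) (s : Int) (hs : List String),
    ((PySem.List.enumerate idxs s).foldl
      (fun hs2 r => PySem.List.pySetD hs2 r.2 (hstr ++ PySem.Int.toStr (start_idx + r.1))) hs).length
      = hs.length := by
  intro idxs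
  induction idxs with
  | nil => intro s hs; simp
  | cons j idxs ih =>
    intro s hs
    simp [PySem.List.enumerate_cons, ih, PySem.List.length_pySetD]

lemma A_loop (tokens : List String) (start_idx : Int) :
    ∀ (rest prev done : List String) (counts : PySem.Dict String Int),
    done.length = prev.length →
    (∀ h ∈ tokens, counts.get? h = some (start_idx + prev.count h)) →
    ((PySem.List.enumerate rest (prev.length : Int)).foldl
      (fun (st : List String × PySem.Dict String Int) p =>
        if p.2 ∈ tokens then
          (PySem.List.pySetD st.1 p.1 (p.2 ++ PySem.Int.toStr (st.2.getD p.2 0)),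
           st.2.insert p.2 (st.2.getD p.2 0 + 1))
        else st)
      (done ++ rest, counts)).1 = done ++ modelGo tokens start_idx prev rest := by
  intro rest
  induction rest with
  | nil => intro prev done counts hlen hc; simp [modelGo]
  | cons h rest ih =>
    intro prev done counts hlen hc
    rw [PySem.List.enumerate_cons, List.foldl_cons]
    by_cases hmem : h ∈ tokens
    · have hget : counts.getD h 0 = start_idx + prev.count h := by
        rw [PySem.Dict.getD_eq_get?_getD, hc h hmem]; rfl
      simp only [hmem, if_pos]
      have hset : PySem.List.pySetD (done ++ h :: rest) ((prev.length : Nat) : Int)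
            (h ++ PySem.Int.toStr (counts.getD h 0))
          = (done ++ [h ++ PySem.Int.toStr (counts.getD h 0)]) ++ rest := by
        rw [PySem.List.pySetD_natCast, List.set_append]
        simp [hlen]
      have hstep : ((prev.length : Int) + 1) = (((prev ++ [h]).length : Nat) : Int) := by
        simp
      rw [hset, hstep]
      have hc' : ∀ h' ∈ tokens, (counts.insert h (counts.getD h 0 + 1)).get? h'
          = some (start_idx + (prev ++ [h]).count h') := by
        intro h' hmem'
        rw [PySem.Dict.get?_insert]
        by_cases he : h' = h
        · subst he
          rw [if_pos rfl, hget]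
          simp [List.count_append]
          ring
        · rw [if_neg he, hc h' hmem']
          have hne2 : ¬ (h = h') := fun hh => he hh.symm
          simp [List.count_append, hne2]
      have hlen' : (done ++ [h ++ PySem.Int.toStr (counts.getD h 0)]).length = (prev ++ [h]).length := by
        simp [hlen]
      have := ih (prev ++ [h]) (done ++ [h ++ PySem.Int.toStr (counts.getD h 0)]) _ hlen' hc'
      rw [this]
      simp only [modelGo, hmem, if_pos, hget]
      simp
    · simp only [hmem, if_false]
      have hstep : ((prev.length : Int) + 1) = (((prev ++ [h]).length : Nat) : Int) := by
        simp
      have hc' : ∀ h' ∈ tokens, counts.get? h' = some (start_idx + (prev ++ [h]).count h') := by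
        intro h' hmem'
        rw [hc h' hmem']
        have hne2 : ¬ (h = h') := fun hh => hmem (hh ▸ hmem')
        simp [List.count_append, hne2]
      have hlen' : (done ++ [h]).length = (prev ++ [h]).length := by simp [hlen]
      have hre : done ++ h :: rest = (done ++ [h]) ++ rest := by simp
      rw [hre, hstep, ih (prev ++ [h]) (done ++ [h]) counts hlen' hc']
      simp [modelGo, hmem]

lemma A_eq_model (headers tokens : List String) (start_idx : Int) :
    enumerate_headers headers tokens start_idx = modelGo tokens start_idx [] headers := by
  unfold enumerate_headers
  have h0 : ((([] : List String).length : Nat) : Int) = 0 := by simp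
  have := A_loop tokens start_idx headers [] []
    (tokens.foldl (fun d t => d.insert t start_idx) PySem.Dict.empty) rfl
    (fun h hmem => by rw [initCounts, if_pos hmem]; simp)
  rw [h0] at this
  simpa using this

lemma inner_getElem? (hstr : String) (start_idx : Int) :
    ∀ (idxs : List Int) (s : Int) (hs : List String) (i : Nat),
    idxs.Nodup →
    (∀ j ∈ idxs, ∃ k : Nat, j = (k : Int) ∧ k < hs.length) →
    ((PySem.List.enumerate idxs s).foldl
      (fun hs2 r => PySem.List.pySetD hs2 r.2 (hstr ++ PySem.Int.toStr (start_idx + r.1))) hs)[i]?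
      = if (i : Int) ∈ idxs
        then some (hstr ++ PySem.Int.toStr (start_idx + s + ((idxs.idxOf (i : Int) : Nat) : Int)))
        else hs[i]? := by
  intro idxs
  induction idxs with
  | nil => intro s hs i _ _; simp
  | cons j idxs ih =>
    intro s hs i hnd hrange
    obtain ⟨k, rfl, hk⟩ := hrange j (List.mem_cons_self)
    rw [PySem.List.enumerate_cons, List.foldl_cons]
    have hset : PySem.List.pySetD hs ((k : Nat) : Int) (hstr ++ PySem.Int.toStr (start_idx + s))
        = hs.set k (hstr ++ PySem.Int.toStr (start_idx + s)) := PySem.List.pySetD_natCast hs k _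
    simp only [hset]
    have hlen' : (hs.set k (hstr ++ PySem.Int.toStr (start_idx + s))).length = hs.length := by simp
    have hrange' : ∀ j ∈ idxs, ∃ k' : Nat, j = (k' : Int) ∧ k' < (hs.set k (hstr ++ PySem.Int.toStr (start_idx + s))).length := by
      intro j hj; rw [hlen']; exact hrange j (List.mem_cons_of_mem _ hj)
    rw [ih (s+1) _ i (List.Nodup.of_cons hnd) hrange']
    by_cases hik : i = k
    · subst hik
      have hnotin : ((i : Nat) : Int) ∉ idxs := by
        have := (List.nodup_cons.mp hnd).1; exact this
      rw [if_neg hnotin, if_pos (List.mem_cons_self)]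
      rw [List.getElem?_set]
      simp only [if_pos hk]
      have : List.idxOf ((i : Nat) : Int) (((i : Nat) : Int) :: idxs) = 0 := by
        simp
      rw [this]
      simp
    · have hne : ((i : Nat) : Int) ≠ ((k : Nat) : Int) := by exact_mod_cast fun hh => hik hh
      have hmemiff : ((i : Nat) : Int) ∈ (((k : Nat) : Int) :: idxs) ↔ ((i : Nat) : Int) ∈ idxs := by
        simp [List.mem_cons, hne]
      by_cases hmem : ((i : Nat) : Int) ∈ idxs
      · rw [if_pos hmem, if_pos (hmemiff.mpr hmem)]
        have hbeq : (((k : Nat) : Int) == ((i : Nat) : Int)) = false := by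
          rw [beq_eq_false_iff_ne]; exact fun hh => hne hh.symm
        rw [List.idxOf_cons, hbeq]
        simp only [cond_false]
        have harg : start_idx + (s+1) + ((idxs.idxOf ((i : Nat) : Int) : Nat) : Int)
            = start_idx + s + (((idxs.idxOf ((i : Nat) : Int) + 1 : Nat)) : Int) := by
          push_cast; ring
        rw [harg]
      · rw [if_neg hmem, if_neg (fun hh => hmem (hmemiff.mp hh))]
        rw [List.getElem?_set, if_neg (fun hh => hik hh.symm)]

lemma keys_fold (headers : List String) (start_idx : Int) :
    ∀ (ks : List String) (hs : List String), hs.length = headers.length →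
    ∀ i : Nat,
    (ks.foldl (fun hs h =>
        (PySem.List.enumerate (occFrom h 0 headers) 0).foldl
          (fun hs2 r => PySem.List.pySetD hs2 r.2 (h ++ PySem.Int.toStr (start_idx + r.1))) hs) hs)[i]?
      = if ∃ h ∈ ks, (i : Int) ∈ occFrom h 0 headers
        then some ((headers.getD i "") ++ PySem.Int.toStr (start_idx + (((headers.take i).count (headers.getD i "") : Nat) : Int)))
        else hs[i]? := by
  intro ks
  induction ks with
  | nil => intro hs hlen i; simp
  | cons h ks ih =>
    intro hs hlen i
    rw [List.foldl_cons]
    have hlen2 : ((PySem.List.enumerate (occFrom h 0 headers) 0).foldl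
        (fun hs2 r => PySem.List.pySetD hs2 r.2 (h ++ PySem.Int.toStr (start_idx + r.1))) hs).length
        = headers.length := by rw [inner_length, hlen]
    rw [ih _ hlen2 i]
    have hrange : ∀ j ∈ occFrom h 0 headers, ∃ k : Nat, j = (k : Int) ∧ k < hs.length := by
      intro j hj
      rcases (mem_occFrom h 0 headers j).mp hj with ⟨k, hk, _, rfl⟩
      exact ⟨k, by ring, by omega⟩
    have hinner := inner_getElem? h start_idx (occFrom h 0 headers) 0 hs i
      (nodup_occFrom h 0 headers) hrange
    by_cases hex : ∃ h' ∈ ks, (i : Int) ∈ occFrom h' 0 headers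
    · rw [if_pos hex]
      obtain ⟨h', hh', hm'⟩ := hex
      rw [if_pos ⟨h', List.mem_cons_of_mem _ hh', hm'⟩]
    · rw [if_neg hex, hinner]
      by_cases hmem : (i : Int) ∈ occFrom h 0 headers
      · -- h is headers[i], value matches
        rcases (mem_occFrom h 0 headers _).mp hmem with ⟨k, hk, hkh, hik⟩
        have hki : k = i := by omega
        subst hki
        have hgd : headers.getD k "" = h := by
          rw [List.getD_eq_getElem?_getD, hkh]; rfl
        have hidx : (occFrom h 0 headers).idxOf ((k : Nat) : Int) = (headers.take k).count h := by
          have := idxOf_occFrom h headers 0 k (by simpa using hmem)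
          simpa using this
        rw [if_pos hmem, if_pos ⟨h, List.mem_cons_self, hmem⟩]
        rw [hidx, hgd]
        norm_num
      · rw [if_neg hmem]
        rw [if_neg ?_]
        rintro ⟨h', hh', hmem'⟩
        rcases List.mem_cons.mp hh' with rfl | hh'2
        · exact hmem hmem'
        · exact hex ⟨h', hh'2, hmem'⟩

lemma contains_ofList_eq (tokens : List String) (x : String) :
    PySem.Set.contains (PySem.Set.ofList tokens) x = decide (x ∈ tokens) := by
  have h1 : PySem.Set.contains (PySem.Set.ofList tokens) x = List.contains (PySem.Set.ofList tokens) x := rfl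
  rw [h1]
  by_cases hx : x ∈ tokens
  · simp [PySem.Set.mem_ofList, hx]
  · simp [PySem.Set.mem_ofList, hx]

lemma B_eq_fold (headers tokens : List String) (start_idx : Int) :
    enumerate_headers_alt headers tokens start_idx =
    (PySem.Set.ofList (headers.filter (fun x => decide (x ∈ tokens)))).foldl
      (fun hs h =>
        (PySem.List.enumerate (occFrom h 0 headers) 0).foldl
          (fun hs2 r => PySem.List.pySetD hs2 r.2 (h ++ PySem.Int.toStr (start_idx + r.1))) hs)
      headers := by
  unfold enumerate_headers_alt
  simp only []
  set tokset := PySem.Set.ofList tokens with htokset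
  -- (i) if-fold = fold over filtered list
  have hif := PySem.List.foldl_if_eq_foldl_filter (fun (p : Int × String) => tokset.contains p.2)
    (fun (d : PySem.Dict String (List Int)) (p : Int × String) => d.modify p.2 [] (· ++ [p.1]))
    (PySem.List.enumerate headers 0) PySem.Dict.empty
  rw [hif]
  set filtered := (PySem.List.enumerate headers 0).filter (fun p => PySem.Set.contains tokset p.2) with hfil
  set positions := filtered.foldl (fun d p => d.modify p.2 [] (· ++ [p.1])) PySem.Dict.empty with hpos
  -- keys
  have hkeys : positions.keys = PySem.Set.ofList (headers.filter (fun x => decide (x ∈ tokens))) := by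
    rw [hpos]
    rw [PySem.Dict.keys_foldl_modify_key filtered (fun p => p.2) [] (fun _ p => (· ++ [p.1])) PySem.Dict.empty]
    rw [PySem.Dict.keys_empty, PySem.Set.update_nil_left]
    congr 1
    have : filtered.map (fun p => p.2) = headers.filter (fun x => PySem.Set.contains tokset x) := by
      have hfm := List.filter_map (f := fun p : Int × String => p.2)
        (p := fun x => tokset.contains x) (l := PySem.List.enumerate headers 0)
      simp only [Function.comp_def] at hfm
      rw [hfil, ← hfm, PySem.List.map_snd_enumerate]
    rw [this]
    exact List.filter_congr (fun x _ => contains_ofList_eq tokens x)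
  have hnodup : positions.keys.Nodup := by
    rw [hpos]
    exact PySem.Dict.nodup_keys_foldl_modify_key filtered (fun p => p.2) [] (fun _ p => (· ++ [p.1]))
      PySem.Dict.empty PySem.Dict.nodup_keys_empty
  -- getD characterization
  have hgetD : ∀ k ∈ tokens, positions.getD k [] = occFrom k 0 headers := by
    intro k hk
    rw [hpos]
    have hswap : filtered.foldl (fun d p => d.modify p.2 [] (· ++ [p.1])) PySem.Dict.empty
        = (filtered.map Prod.swap).foldl (fun d q => d.modify q.1 [] (· ++ [q.2])) PySem.Dict.empty := by
      rw [List.foldl_map]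
      simp [Prod.swap]
    rw [hswap, PySem.Dict.getD_foldl_modify_append]
    simp only [PySem.Dict.getD_empty, List.nil_append]
    have h2 : (filtered.map Prod.swap).filter (fun p => p.1 == k)
        = (filtered.filter (fun p => p.2 == k)).map Prod.swap := by
      rw [List.filter_map]
      rfl
    rw [h2, List.map_map]
    have h3 : filtered.filter (fun p => p.2 == k) = (PySem.List.enumerate headers 0).filter (fun p => p.2 == k) := by
      rw [hfil, List.filter_filter]
      refine List.filter_congr (fun p _ => ?_)
      by_cases hpk : p.2 == k
      · have : p.2 = k := by simpa using hpk
        simp [this, htokset, hk]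
      · simp [hpk]
    rw [h3]
    rfl
  -- items
  rw [PySem.Dict.items_eq_map_keys positions hnodup []]
  rw [List.foldl_map]
  rw [hkeys]
  refine PySem.List.foldl_congr_mem _ _ _ headers (fun acc x hx => ?_)
  have hxtok : x ∈ tokens := by
    have := (PySem.Set.mem_ofList _ x).mp hx
    simp only [List.mem_filter, decide_eq_true_eq] at this
    exact this.2
  rw [hgetD x hxtok]

-- ===== VERDICT (by name: the statement is the Claim_ definition above) =====
theorem enumerate_headers_spec : Claim_equal_enumerate_headers := by
  intro headers tokens start_idx _dom
  unfold Spec_enumerate_headers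
  rw [A_eq_model headers tokens start_idx, B_eq_fold headers tokens start_idx]
  apply List.ext_getElem?
  intro i
  rw [modelGo_getElem? tokens start_idx headers [] i]
  rw [keys_fold headers start_idx _ headers rfl i]
  by_cases hi : i < headers.length
  · have hget : headers[i]? = some headers[i] := List.getElem?_eq_getElem hi
    have hgd : headers.getD i "" = headers[i] := by
      rw [List.getD_eq_getElem?_getD, hget]; rfl
    by_cases htok : headers[i] ∈ tokens
    · have hK : headers[i] ∈ PySem.Set.ofList (headers.filter (fun x => decide (x ∈ tokens))) := by
        rw [PySem.Set.mem_ofList, List.mem_filter]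
        exact ⟨List.getElem_mem hi, by simpa using htok⟩
      have hocc : ((i : Nat) : Int) ∈ occFrom headers[i] 0 headers := by
        rw [mem_occFrom]
        exact ⟨i, hi, hget, by simp⟩
      rw [if_pos ⟨headers[i], hK, hocc⟩, hget]
      simp only [Option.map_some, List.nil_append]
      rw [if_pos htok, hgd]
    · have hnex : ¬ ∃ h ∈ PySem.Set.ofList (headers.filter (fun x => decide (x ∈ tokens))),
          ((i : Nat) : Int) ∈ occFrom h 0 headers := by
        rintro ⟨h, hK, hocc⟩
        rcases (mem_occFrom h 0 headers _).mp hocc with ⟨k, hk, hkh, heq⟩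
        have hik : k = i := by omega
        subst hik
        have : h = headers[k] := by
          rw [hget] at hkh; exact (Option.some_inj.mp hkh).symm
        subst this
        rw [PySem.Set.mem_ofList, List.mem_filter] at hK
        exact htok (by simpa using hK.2)
      rw [if_neg hnex, hget]
      simp only [Option.map_some]
      rw [if_neg htok]
  · have hget : headers[i]? = none := List.getElem?_eq_none (by omega)
    have hnex : ¬ ∃ h ∈ PySem.Set.ofList (headers.filter (fun x => decide (x ∈ tokens))),
        ((i : Nat) : Int) ∈ occFrom h 0 headers := by
      rintro ⟨h, _, hocc⟩
      rcases (mem_occFrom h 0 headers _).mp hocc with ⟨k, hk, _, heq⟩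
      omega
    rw [if_neg hnex, hget]
    simp
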